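-- pv_equiv track=rewrite | github.com/mahathibodela/AI_algos_code | genetic.py | computeObjective
-- ===== SOURCE A (Python) =====
-- def isAttack(pos1,pos2):
--     r1,c1=pos1
--     r2,c2=pos2
--
--     if r1==r2 or c1==c2:
--         return True
--
--     if abs(r1-r2)==abs(c1-c2):
--         return True
--
--     return False
--
-- def compute(pos):
--     #input is in the format of [[r,c]...]
--
--     tot=0
--     for i in range(len(pos)):
--         for j in range(i+1,len(pos)):
--             if isAttack(pos[i],pos[j]):
--                 tot+=1
--     return 28-tot
--
-- def computeObjective(states,best,bestObj):
--     #here the objValue is 1/no of queens attacking each other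
--     objective_value=[]
--
--     for j,state in enumerate(states):
--         queen_pos=[]
--         for i in range(len(state)):
--             queen_pos.append((i,int(state[i])-1))
--         value=compute(queen_pos)
--         if value>bestObj:
--             best=state
--             bestObj=value
--         objective_value.append(value)
--
--     return objective_value,best,bestObj
-- ===== SOURCE B (Python) =====
-- def computeObjective(states, best, bestObj):
--     # One O(n) counting pass per state instead of the O(n^2) pairwise scan:
--     # queens attack iff they share a column, a r-c diagonal or a r+c diagonal,
--     # and rows are distinct, so the three collision kinds are mutually exclusive.
--     objective_value = []
--     for state in states:
--         cols = {}
--         diag = {}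
--         anti = {}
--         attacks = 0
--         for i, s in enumerate(state):
--             c = int(s) - 1
--             attacks += cols.get(c, 0) + diag.get(i - c, 0) + anti.get(i + c, 0)
--             cols[c] = cols.get(c, 0) + 1
--             diag[i - c] = diag.get(i - c, 0) + 1
--             anti[i + c] = anti.get(i + c, 0) + 1
--         value = 28 - attacks
--         if value > bestObj:
--             best = state
--             bestObj = value
--         objective_value.append(value)
--     return objective_value, best, bestObj
-- ===== Notes on version B (the rewrite author's own statement) =====
-- stated objective: faster
-- what changed: Per state, the O(n^2) pairwise isAttack scan is replaced by a single counting pass over three dictionaries keyed by column, r-c diagonal and r+c anti-diagonal (rows are distinct, so the three collision kinds are mutually exclusive); the outer best-tracking loop is kept.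
import Mathlib
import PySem

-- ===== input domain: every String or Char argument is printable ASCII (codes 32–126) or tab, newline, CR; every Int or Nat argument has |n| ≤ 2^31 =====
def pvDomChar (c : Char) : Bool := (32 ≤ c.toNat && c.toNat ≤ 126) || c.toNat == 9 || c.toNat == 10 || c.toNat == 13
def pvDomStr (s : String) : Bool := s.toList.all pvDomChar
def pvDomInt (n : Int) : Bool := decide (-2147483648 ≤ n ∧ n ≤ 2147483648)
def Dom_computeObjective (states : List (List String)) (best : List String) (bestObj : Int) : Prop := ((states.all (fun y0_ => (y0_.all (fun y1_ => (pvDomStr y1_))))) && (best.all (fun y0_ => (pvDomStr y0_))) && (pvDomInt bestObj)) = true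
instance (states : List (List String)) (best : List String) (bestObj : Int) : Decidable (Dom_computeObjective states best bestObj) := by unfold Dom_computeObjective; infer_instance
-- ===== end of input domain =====

-- B replaces A's O(n^2) pairwise attack scan per state with one counting pass over
-- three dictionaries (column, r-c diagonal, r+c anti-diagonal); outer best-tracking loop kept.

-- ===== PORT A =====
def isAttackA (pos1 pos2 : Int × Int) : Bool :=
  if pos1.1 == pos2.1 || pos1.2 == pos2.2 then true
  else if (pos1.1 - pos2.1).natAbs == (pos1.2 - pos2.2).natAbs then true
  else false

def computeA (pos : List (Int × Int)) : Int :=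
  let tot :=
    (PySem.List.pyRange 0 (pos.length : Int) 1).foldl (fun tot i =>
      (PySem.List.pyRange (i + 1) (pos.length : Int) 1).foldl (fun tot j =>
        if isAttackA (PySem.List.pyGetD pos i (0, 0)) (PySem.List.pyGetD pos j (0, 0)) then tot + 1
        else tot) tot) 0
  28 - tot

def computeObjective (states : List (List String)) (best : List String) (bestObj : Int) :
    List Int × List String × Int :=
  (PySem.List.enumerate states 0).foldl
    (fun (acc : List Int × List String × Int) jstate =>
      let state := jstate.2
      let queen_pos :=
        (PySem.List.pyRange 0 (state.length : Int) 1).foldl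
          (fun qp i =>
            qp ++ [(i, (PySem.Int.ofStr? (PySem.List.pyGetD state i "")).getD 0 - 1)]) []
      let value := computeA queen_pos
      let best' := if value > acc.2.2 then state else acc.2.1
      let bestObj' := if value > acc.2.2 then value else acc.2.2
      (acc.1 ++ [value], best', bestObj'))
    ([], best, bestObj)

-- ===== PORT B =====
def stepB (st : PySem.Dict Int Int × PySem.Dict Int Int × PySem.Dict Int Int × Int)
    (p : Int × Int) : PySem.Dict Int Int × PySem.Dict Int Int × PySem.Dict Int Int × Int :=
  let cols := st.1; let diag := st.2.1; let anti := st.2.2.1; let attacks := st.2.2.2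
  let attacks := attacks + cols.getD p.2 0 + diag.getD (p.1 - p.2) 0 + anti.getD (p.1 + p.2) 0
  (cols.modify p.2 0 (· + 1), diag.modify (p.1 - p.2) 0 (· + 1),
   anti.modify (p.1 + p.2) 0 (· + 1), attacks)

def computeObjective_alt (states : List (List String)) (best : List String) (bestObj : Int) :
    List Int × List String × Int :=
  states.foldl
    (fun (acc : List Int × List String × Int) state =>
      let r := (PySem.List.enumerate state 0).foldl
        (fun st is => stepB st (is.1, (PySem.Int.ofStr? is.2).getD 0 - 1))
        (PySem.Dict.empty, PySem.Dict.empty, PySem.Dict.empty, 0)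
      let value := 28 - r.2.2.2
      let best' := if value > acc.2.2 then state else acc.2.1
      let bestObj' := if value > acc.2.2 then value else acc.2.2
      (acc.1 ++ [value], best', bestObj'))
    ([], best, bestObj)

-- ===== PRECONDITION & SPEC =====
-- Pre_ excludes exactly the inputs where Python A raises ValueError: some queen string
-- inside states is not parseable by int().  (best's strings are never parsed.)
def Pre_computeObjective (states : List (List String)) (best : List String) (bestObj : Int) : Prop :=
  (states.all (fun state => state.all (fun s => (PySem.Int.ofStr? s).isSome))) = true

instance (states : List (List String)) (best : List String) (bestObj : Int) :
    Decidable (Pre_computeObjective states best bestObj) := by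
  unfold Pre_computeObjective; infer_instance

def pvWitness_computeObjective : List (List String) × List String × Int :=
  ([["1", "3", "2"], ["2", "2"]], ["1"], -5)

def Spec_computeObjective (states : List (List String)) (best : List String) (bestObj : Int)
    (out : List Int × List String × Int) : Prop := out = computeObjective_alt states best bestObj

instance (states : List (List String)) (best : List String) (bestObj : Int)
    (out : List Int × List String × Int) : Decidable (Spec_computeObjective states best bestObj out) := by
  unfold Spec_computeObjective; infer_instance

-- ===== CLAIM (what is proved, stated in full; the proofs are below) =====
def Claim_equal_computeObjective : Prop := ∀ (states : List (List String)) (best : List String) (bestObj : Int), Dom_computeObjective states best bestObj → Pre_computeObjective states best bestObj → Spec_computeObjective states best bestObj (computeObjective states best bestObj)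

-- ===== LEMMAS AND PROOFS =====

-- positions of a state's queens, as B traverses them
def posL (state : List String) : List (Int × Int) :=
  (PySem.List.enumerate state 0).map (fun p => (p.1, (PySem.Int.ofStr? p.2).getD 0 - 1))

-- number of attacking (unordered) pairs, scanned from the head
def pairsN : List (Int × Int) → Nat
  | [] => 0
  | p :: rest => rest.countP (fun q => isAttackA p q) + pairsN rest

-- cross pairs between a prefix and a suffix
def crossN (pre ps : List (Int × Int)) : Nat :=
  (ps.map (fun q => pre.countP (fun p => isAttackA p q))).sum

-- the three counting dictionaries after processing a prefix
def colsD (pre : List (Int × Int)) : PySem.Dict Int Int :=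
  pre.foldl (fun d p => d.modify p.2 0 (· + 1)) PySem.Dict.empty
def diagD (pre : List (Int × Int)) : PySem.Dict Int Int :=
  pre.foldl (fun d p => d.modify (p.1 - p.2) 0 (· + 1)) PySem.Dict.empty
def antiD (pre : List (Int × Int)) : PySem.Dict Int Int :=
  pre.foldl (fun d p => d.modify (p.1 + p.2) 0 (· + 1)) PySem.Dict.empty

theorem attack_iff (p q : Int × Int) :
    isAttackA p q = true ↔ (p.1 = q.1 ∨ p.2 = q.2 ∨ p.1 - p.2 = q.1 - q.2 ∨ p.1 + p.2 = q.1 + q.2) := by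
  simp only [isAttackA]
  split_ifs with h1 h2 <;> simp_all <;> omega

-- counting dictionaries count keys
theorem colsD_getD (pre : List (Int × Int)) (c : Int) :
    (colsD pre).getD c 0 = (pre.countP (fun p => p.2 == c) : Int) := by
  have h : colsD pre = (pre.map (·.2)).foldl (fun d x => d.modify x 0 (· + 1)) PySem.Dict.empty := by
    rw [List.foldl_map]; rfl
  rw [h, PySem.Dict.getD_foldl_modify_add_one]
  simp [List.count, List.countP_map, Function.comp_def]

theorem diagD_getD (pre : List (Int × Int)) (c : Int) :
    (diagD pre).getD c 0 = (pre.countP (fun p => p.1 - p.2 == c) : Int) := by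
  have h : diagD pre = (pre.map (fun p => p.1 - p.2)).foldl (fun d x => d.modify x 0 (· + 1)) PySem.Dict.empty := by
    rw [List.foldl_map]; rfl
  rw [h, PySem.Dict.getD_foldl_modify_add_one]
  simp [List.count, List.countP_map, Function.comp_def]

theorem antiD_getD (pre : List (Int × Int)) (c : Int) :
    (antiD pre).getD c 0 = (pre.countP (fun p => p.1 + p.2 == c) : Int) := by
  have h : antiD pre = (pre.map (fun p => p.1 + p.2)).foldl (fun d x => d.modify x 0 (· + 1)) PySem.Dict.empty := by
    rw [List.foldl_map]; rfl
  rw [h, PySem.Dict.getD_foldl_modify_add_one]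
  simp [List.count, List.countP_map, Function.comp_def]

-- with distinct rows the three collision kinds are mutually exclusive and cover attacks
theorem count_split (pre : List (Int × Int)) (q : Int × Int)
    (h : ∀ p ∈ pre, p.1 ≠ q.1) :
    pre.countP (fun p => p.2 == q.2) + pre.countP (fun p => p.1 - p.2 == q.1 - q.2)
      + pre.countP (fun p => p.1 + p.2 == q.1 + q.2)
      = pre.countP (fun p => isAttackA p q) := by
  induction pre with
  | nil => simp
  | cons p rest ih =>
    have hp : p.1 ≠ q.1 := h p (List.mem_cons_self ..)
    have hrest := ih (fun x hx => h x (List.mem_cons_of_mem _ hx))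
    simp only [List.countP_cons]
    split_ifs <;> simp only [beq_iff_eq, attack_iff] at * <;> omega

theorem crossN_snoc (pre : List (Int × Int)) (q : Int × Int) (rest : List (Int × Int)) :
    crossN (pre ++ [q]) rest = crossN pre rest + rest.countP (fun x => isAttackA q x) := by
  induction rest with
  | nil => simp [crossN]
  | cons x rest ih =>
    simp only [crossN, List.map_cons, List.sum_cons, List.countP_cons, List.countP_append,
      List.countP_cons, List.countP_nil] at *
    split_ifs <;> omega

-- one step of B extends the prefix dictionaries and adds the attack count against the prefix
theorem stepB_eq (pre : List (Int × Int)) (q : Int × Int) (acc : Int) :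
    stepB (colsD pre, diagD pre, antiD pre, acc) q
      = (colsD (pre ++ [q]), diagD (pre ++ [q]), antiD (pre ++ [q]),
         acc + (colsD pre).getD q.2 0 + (diagD pre).getD (q.1 - q.2) 0
             + (antiD pre).getD (q.1 + q.2) 0) := by
  simp [stepB, colsD, diagD, antiD, List.foldl_append]

-- B's inner loop counts all attacking pairs
theorem Bloop (ps : List (Int × Int)) : ∀ (pre : List (Int × Int)) (acc : Int),
    (pre ++ ps).Pairwise (fun p q => p.1 ≠ q.1) →
    (ps.foldl stepB (colsD pre, diagD pre, antiD pre, acc)).2.2.2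
      = acc + (crossN pre ps : Int) + (pairsN ps : Int) := by
  induction ps with
  | nil => intro pre acc _; simp [crossN, pairsN]
  | cons q rest ih =>
    intro pre acc h
    have hq : ∀ p ∈ pre, p.1 ≠ q.1 := by
      rw [List.pairwise_append] at h
      exact fun p hp => h.2.2 p hp q (List.mem_cons_self ..)
    have h' : ((pre ++ [q]) ++ rest).Pairwise (fun p q => p.1 ≠ q.1) := by
      simpa using h
    rw [List.foldl_cons, stepB_eq, ih (pre ++ [q]) _ h']
    rw [colsD_getD, diagD_getD, antiD_getD, crossN_snoc]
    have hsplit := count_split pre q hq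
    have : crossN pre (q :: rest)
        = pre.countP (fun p => isAttackA p q) + crossN pre rest := by
      simp [crossN]
    rw [this]
    simp only [pairsN]
    push_cast
    omega

-- A's nested index loops count all attacking pairs
theorem Aloop (ps : List (Int × Int)) :
    ((List.range ps.length).map (fun k =>
      (((ps.drop (k + 1)).countP (fun q => isAttackA (ps.getD k (0, 0)) q) : Nat) : Int))).sum
      = (pairsN ps : Int) := by
  induction ps with
  | nil => simp [pairsN]
  | cons p rest ih =>
    rw [List.length_cons, List.range_succ_eq_map, List.map_cons, List.map_map, List.sum_cons]
    simp only [Function.comp_def, Nat.succ_eq_add_one, List.getD_cons_succ, List.drop_succ_cons,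
      List.getD_cons_zero, pairsN]
    rw [ih, List.drop_zero]
    omega

theorem computeA_eq (ps : List (Int × Int)) : computeA ps = 28 - (pairsN ps : Int) := by
  have hfun : (fun (tot : Int) (i : Int) =>
      (PySem.List.pyRange (i + 1) (ps.length : Int) 1).foldl
        (fun tot j => if isAttackA (PySem.List.pyGetD ps i (0, 0)) (PySem.List.pyGetD ps j (0, 0))
          then tot + 1 else tot) tot)
      = fun (tot : Int) (i : Int) => tot +
        (((PySem.List.pyRange (i + 1) (ps.length : Int) 1).countP
          (fun j => isAttackA (PySem.List.pyGetD ps i (0, 0)) (PySem.List.pyGetD ps j (0, 0))) : Nat) : Int) := by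
    funext tot i
    exact PySem.List.foldl_if_add_one _ _ _
  unfold computeA
  rw [hfun, PySem.List.foldl_add]
  have hterm : ∀ i ∈ PySem.List.pyRange 0 (ps.length : Int) 1,
      (((PySem.List.pyRange (i + 1) (ps.length : Int) 1).countP
        (fun j => isAttackA (PySem.List.pyGetD ps i (0, 0)) (PySem.List.pyGetD ps j (0, 0))) : Nat) : Int)
      = (((ps.drop (i + 1).toNat).countP
          (fun q => isAttackA (PySem.List.pyGetD ps i (0, 0)) q) : Nat) : Int) := by
    intro i hi
    have hi0 : (0 : Int) ≤ i + 1 := by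
      have := (PySem.List.mem_pyRange_one).mp hi
      omega
    have h := PySem.List.map_pyGetD_pyRange' ps (0, 0) hi0 (a := i + 1)
    congr 1
    rw [← h, List.countP_map]
    simp [Function.comp_def]
  rw [List.map_congr_left hterm, PySem.List.pyRange_zero_nat, List.map_map]
  have hterm2 : ∀ k ∈ List.range ps.length,
      ((fun i => (((ps.drop (i + 1).toNat).countP
          (fun q => isAttackA (PySem.List.pyGetD ps i (0, 0)) q) : Nat) : Int)) ∘ (fun (k : Nat) => (k : Int))) k
      = (((ps.drop (k + 1)).countP (fun q => isAttackA (ps.getD k (0, 0)) q) : Nat) : Int) := by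
    intro k _
    simp only [Function.comp_def]
    rw [show ((k : Int) + 1).toNat = k + 1 from by omega, PySem.List.pyGetD_natCast]
  rw [List.map_congr_left hterm2, Aloop]
  simp

-- the index-built queen list is enumerate-shaped
theorem enum_map {α : Type} (xs : List String) (f : Int → String → α) : ∀ s : Int,
    (PySem.List.enumerate xs s).map (fun p => f p.1 p.2)
      = (List.range xs.length).map (fun (k : Nat) => f (s + (k : Int)) (xs.getD k "")) := by
  induction xs with
  | nil => intro s; simp [PySem.List.enumerate_nil]
  | cons x xs ih =>
    intro s
    rw [PySem.List.enumerate_cons, List.map_cons, List.length_cons, List.range_succ_eq_map,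
      List.map_cons, List.map_map, ih (s + 1)]
    simp only [Function.comp_def, Nat.succ_eq_add_one, List.getD_cons_succ, List.getD_cons_zero]
    refine List.cons_eq_cons.mpr ⟨by norm_num, ?_⟩
    apply List.map_congr_left
    intro k _
    congr 1
    push_cast
    ring

-- A's queen_pos construction builds posL
theorem build_eq (state : List String) :
    (PySem.List.pyRange 0 (state.length : Int) 1).foldl
        (fun qp i => qp ++ [(i, (PySem.Int.ofStr? (PySem.List.pyGetD state i "")).getD 0 - 1)]) []
      = posL state := by
  rw [PySem.List.foldl_append_singleton_eq_map, List.nil_append, PySem.List.pyRange_zero_nat,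
    List.map_map]
  unfold posL
  rw [enum_map state (fun i s => (i, (PySem.Int.ofStr? s).getD 0 - 1)) 0]
  apply List.map_congr_left
  intro k _
  simp only [Function.comp_def]
  rw [PySem.List.pyGetD_natCast]
  norm_num

-- rows of posL are pairwise distinct
theorem posL_rows (state : List String) : (posL state).Pairwise (fun p q => p.1 ≠ q.1) := by
  have h1 : (PySem.List.pyRange 0 (0 + (state.length : Int)) 1).Pairwise (· < ·) :=
    PySem.List.pairwise_lt_pyRange_one ..
  rw [← PySem.List.map_fst_enumerate, List.pairwise_map] at h1
  unfold posL
  rw [List.pairwise_map]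
  exact h1.imp (fun h => ne_of_lt h)

-- per-state objective values agree
theorem value_eq (state : List String) :
    computeA ((PySem.List.pyRange 0 (state.length : Int) 1).foldl
        (fun qp i => qp ++ [(i, (PySem.Int.ofStr? (PySem.List.pyGetD state i "")).getD 0 - 1)]) [])
      = 28 - ((PySem.List.enumerate state 0).foldl
          (fun st is => stepB st (is.1, (PySem.Int.ofStr? is.2).getD 0 - 1))
          (PySem.Dict.empty, PySem.Dict.empty, PySem.Dict.empty, 0)).2.2.2 := by
  rw [build_eq, computeA_eq]
  have hfold : (PySem.List.enumerate state 0).foldl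
      (fun st is => stepB st (is.1, (PySem.Int.ofStr? is.2).getD 0 - 1))
      (PySem.Dict.empty, PySem.Dict.empty, PySem.Dict.empty, 0)
      = (posL state).foldl stepB (colsD [], diagD [], antiD [], 0) := by
    unfold posL
    rw [List.foldl_map]
    rfl
  rw [hfold, Bloop (posL state) [] 0 (by simpa using posL_rows state)]
  simp [crossN]

-- ===== VERDICT (by name: the statement is the Claim_ definition above) =====
theorem computeObjective_spec : Claim_equal_computeObjective := by
  intro states best bestObj _ _
  unfold Spec_computeObjective computeObjective computeObjective_alt
  conv_rhs => rw [← PySem.List.map_snd_enumerate states 0]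
  rw [List.foldl_map]
  have hstep : (fun (acc : List Int × List String × Int) (jstate : Int × List String) =>
      let state := jstate.2
      let queen_pos :=
        (PySem.List.pyRange 0 (state.length : Int) 1).foldl
          (fun qp i =>
            qp ++ [(i, (PySem.Int.ofStr? (PySem.List.pyGetD state i "")).getD 0 - 1)]) []
      let value := computeA queen_pos
      let best' := if value > acc.2.2 then state else acc.2.1
      let bestObj' := if value > acc.2.2 then value else acc.2.2
      (acc.1 ++ [value], best', bestObj'))
      = (fun (acc : List Int × List String × Int) (jstate : Int × List String) =>
      let state := jstate.2
      let r := (PySem.List.enumerate state 0).foldl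
        (fun st is => stepB st (is.1, (PySem.Int.ofStr? is.2).getD 0 - 1))
        (PySem.Dict.empty, PySem.Dict.empty, PySem.Dict.empty, 0)
      let value := 28 - r.2.2.2
      let best' := if value > acc.2.2 then state else acc.2.1
      let bestObj' := if value > acc.2.2 then value else acc.2.2
      (acc.1 ++ [value], best', bestObj')) := by
    funext acc jstate
    simp only [value_eq]
  rw [hstep]
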